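-- pv_equiv track=rewrite | github.com/aiwithqasim/PIAIC-Artificial-Intelligence | Q1/batch1/assignment/labs109.py | brangelina
-- ===== SOURCE A (Python) =====
-- def brangelina(first, second):
--     vowels = ['a','e','i', 'o', 'u']
--     fcnt = 0
--     sindex = 0
--     findex = 0
--     flag = False
--     for i in range(len(first)): # This for-loop counts the number of vowel groups
--         if first[i] in vowels:
--             if not flag:
--                 fcnt += 1
--                 findex = i      # set vowel group index
--                 flag = True
--         else:
--             flag = False
--
--     if fcnt > 1:                # if vowel group count >0
--         flag = False
--         for i in range(findex-1, -1, -1):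
--             if first[i] in vowels:
--                 findex = i      # find the index of second last vowel group
--                 flag = True
--             else:
--                 if flag:
--                     break
--     for i in range(len(second)):  # find the index of first vowel group
--         if second[i] in vowels:
--             break
--         sindex +=1
--     return(first[:findex] + second[sindex:]) # return combined word
-- ===== SOURCE B (Python) =====
-- def brangelina(first, second):
--     # One forward pass over `first`, tracking the starts of the last two vowel groups.
--     cnt = 0
--     prev = 0
--     cur = 0
--     in_group = False
--     for i, ch in enumerate(first):
--         if ch in "aeiou":
--             if not in_group:
--                 cnt += 1
--                 prev, cur = cur, i
--                 in_group = True
--         else: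
--             in_group = False
--     findex = prev if cnt >= 2 else cur
--     sindex = next((i for i, ch in enumerate(second) if ch in "aeiou"), len(second))
--     return first[:findex] + second[sindex:]
-- ===== Notes on version B (the rewrite author's own statement) =====
-- stated objective: simpler
-- what changed: B replaces A's forward vowel-group count plus a second backward flag-scan of `first` with a single forward pass that keeps the starts of the last two vowel groups, and replaces the counting loop over `second` with a first-vowel-index lookup.
import Mathlib
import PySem

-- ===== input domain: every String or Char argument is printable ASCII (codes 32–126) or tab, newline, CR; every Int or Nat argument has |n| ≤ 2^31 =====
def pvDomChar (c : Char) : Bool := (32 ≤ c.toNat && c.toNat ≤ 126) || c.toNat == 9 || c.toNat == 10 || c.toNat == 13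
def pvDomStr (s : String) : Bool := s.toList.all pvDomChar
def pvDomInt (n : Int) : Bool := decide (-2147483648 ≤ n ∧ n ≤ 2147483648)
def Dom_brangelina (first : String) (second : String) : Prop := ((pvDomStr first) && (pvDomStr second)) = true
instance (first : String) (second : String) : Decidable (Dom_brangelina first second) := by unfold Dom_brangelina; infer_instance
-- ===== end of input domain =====

-- B replaces A's forward group-count + backward flag-scan with one forward pass
-- keeping the last two vowel-group starts (objective: simpler decomposition).

-- ===== PORT A =====
-- `c in vowels`
def isVowelA (c : Char) : Bool := (['a','e','i','o','u'] : List Char).contains c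

-- A's first loop: for i in range(len(first)) over state (fcnt, findex, flag);
-- the index counter i is carried explicitly (always = position, so Nat is exact).
def fwdA : List Char → Nat → (Nat × Nat × Bool) → (Nat × Nat × Bool)
  | [], _, st => st
  | c :: t, i, st =>
      fwdA t (i + 1)
        (if isVowelA c then
          (if !st.2.2 then (st.1 + 1, i, true) else st)
        else (st.1, st.2.1, false))

-- A's backward loop: for i in range(findex-1, -1, -1) with break; n counts the
-- remaining indices (n iterations visit i = n-1, …, 0); cs[i] is in range, so
-- getD's default is unreachable (exact).
def backA (cs : List Char) : Nat → Nat → Bool → Nat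
  | 0, findex, _ => findex
  | n + 1, findex, flag =>
      if isVowelA (cs.getD n ' ') then backA cs n n true
      else if flag then findex else backA cs n findex false

-- A's third loop: count sindex until the first vowel of `second` (break).
def sidxA : List Char → Nat → Nat
  | [], acc => acc
  | c :: t, acc => if isVowelA c then acc else sidxA t (acc + 1)

def brangelina (first : String) (second : String) : String :=
  let cs := first.toList
  let st := fwdA cs 0 (0, 0, false)
  let findex := if st.1 > 1 then backA cs st.2.1 st.2.1 false else st.2.1
  let sindex := sidxA second.toList 0
  -- first[:findex] + second[sindex:] with 0 ≤ findex, 0 ≤ sindex (exact)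
  String.mk (cs.take findex ++ second.toList.drop sindex)

-- ===== PORT B =====
def isVowelB (c : Char) : Bool := "aeiou".toList.contains c

-- B's single pass: state (cnt, prev, cur, in_group); prev/cur are the starts of
-- the previous and current vowel groups.
def fwdB : List Char → Nat → (Nat × Nat × Nat × Bool) → (Nat × Nat × Nat × Bool)
  | [], _, st => st
  | c :: t, i, st =>
      fwdB t (i + 1)
        (if isVowelB c then
          (if !st.2.2.2 then (st.1 + 1, st.2.2.1, i, true) else st)
        else (st.1, st.2.1, st.2.2.1, false))

def brangelina_alt (first : String) (second : String) : String :=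
  let cs := first.toList
  let st := fwdB cs 0 (0, 0, 0, false)
  let findex := if 2 ≤ st.1 then st.2.1 else st.2.2.1
  -- next((i for i, ch in enumerate(second) if ch in "aeiou"), len(second))
  let sindex := second.toList.findIdx isVowelB
  String.mk (cs.take findex ++ second.toList.drop sindex)

-- ===== PRECONDITION & SPEC =====
def Spec_brangelina (first : String) (second : String) (out : String) : Prop := out = brangelina_alt first second
instance (first : String) (second : String) (out : String) : Decidable (Spec_brangelina first second out) := by unfold Spec_brangelina; infer_instance

-- ===== CLAIM (what is proved, stated in full; the proofs are below) =====
def Claim_equal_brangelina : Prop := ∀ (first : String) (second : String), Dom_brangelina first second → Spec_brangelina first second (brangelina first second)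

-- ===== LEMMAS AND PROOFS =====

theorem isVowelB_eq (c : Char) : isVowelB c = isVowelA c := by
  simp [isVowelA, isVowelB]

theorem getD_snoc (cs : List Char) (c d : Char) : (cs ++ [c]).getD cs.length d = c := by
  rw [List.getD_append_right _ _ _ _ (Nat.le_refl _)]
  simp

-- the backward scan only reads indices < n
theorem backA_append (cs : List Char) (c : Char) :
    ∀ (n f : Nat) (fl : Bool), n ≤ cs.length →
      backA (cs ++ [c]) n f fl = backA cs n f fl := by
  intro n
  induction n with
  | zero => intro f fl _; rfl
  | succ n ih =>
      intro f fl h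
      have hn : n < cs.length := h
      simp only [backA, List.getD_append _ _ _ _ hn]
      split
      · exact ih n true (Nat.le_of_lt hn)
      · split
        · rfl
        · exact ih f false (Nat.le_of_lt hn)

theorem fwdA_snoc (cs : List Char) (c : Char) (i : Nat) (st : Nat × Nat × Bool) :
    fwdA (cs ++ [c]) i st =
      (fun st => if isVowelA c then (if !st.2.2 then (st.1 + 1, i + cs.length, true) else st)
        else (st.1, st.2.1, false)) (fwdA cs i st) := by
  induction cs generalizing i st with
  | nil => simp [fwdA]
  | cons d t ih =>
      simp only [List.cons_append, fwdA, ih, List.length_cons]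
      rw [show i + 1 + t.length = i + (t.length + 1) from by omega]

theorem fwdB_snoc (cs : List Char) (c : Char) (i : Nat) (st : Nat × Nat × Nat × Bool) :
    fwdB (cs ++ [c]) i st =
      (fun st => if isVowelB c then (if !st.2.2.2 then (st.1 + 1, st.2.2.1, i + cs.length, true) else st)
        else (st.1, st.2.1, st.2.2.1, false)) (fwdB cs i st) := by
  induction cs generalizing i st with
  | nil => simp [fwdB]
  | cons d t ih =>
      simp only [List.cons_append, fwdB, ih, List.length_cons]
      rw [show i + 1 + t.length = i + (t.length + 1) from by omega]

-- The joint invariant of the two forward passes, together with the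
-- characterisation of A's backward scan on the accumulated prefix.
theorem joint_inv (cs : List Char) :
    (fwdA cs 0 (0, 0, false)).1 = (fwdB cs 0 (0, 0, 0, false)).1
    ∧ (fwdA cs 0 (0, 0, false)).2.1 = (fwdB cs 0 (0, 0, 0, false)).2.2.1
    ∧ (fwdA cs 0 (0, 0, false)).2.2 = (fwdB cs 0 (0, 0, 0, false)).2.2.2
    ∧ (fwdA cs 0 (0, 0, false)).2.1 ≤ cs.length
    ∧ ((fwdA cs 0 (0, 0, false)).2.2 = false → ∀ j, backA cs cs.length j true = j)
    ∧ ((fwdA cs 0 (0, 0, false)).2.2 = true →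
        ∀ j, backA cs cs.length j true = (fwdA cs 0 (0, 0, false)).2.1)
    ∧ (1 ≤ (fwdA cs 0 (0, 0, false)).1 →
        ∀ f, backA cs cs.length f false = (fwdA cs 0 (0, 0, false)).2.1)
    ∧ (2 ≤ (fwdA cs 0 (0, 0, false)).1 →
        backA cs (fwdA cs 0 (0, 0, false)).2.1 (fwdA cs 0 (0, 0, false)).2.1 false
          = (fwdB cs 0 (0, 0, 0, false)).2.1) := by
  induction cs using List.reverseRecOn with
  | nil =>
      refine ⟨rfl, rfl, rfl, Nat.le_refl 0, fun _ j => rfl, ?_, ?_, ?_⟩ <;>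
        intro h <;> simp [fwdA] at h
  | append_singleton cs c ih =>
      obtain ⟨h1, h2, h3, hle, hC3, hC2, hC1, hP⟩ := ih
      have hstep1 : ∀ (j : Nat) (fl : Bool), isVowelA c = true →
          backA (cs ++ [c]) (cs.length + 1) j fl = backA cs cs.length cs.length true := by
        intro j fl hv
        simp only [backA, getD_snoc, hv, if_true]
        exact backA_append cs c _ _ _ (Nat.le_refl _)
      simp only [List.length_append, List.length_singleton]
      by_cases hv : isVowelA c = true
      · by_cases hf : (fwdA cs 0 (0, 0, false)).2.2 = true
        · -- vowel, flag already true: both states unchanged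
          have hfB : (fwdB cs 0 (0, 0, 0, false)).2.2.2 = true := h3 ▸ hf
          have eA : fwdA (cs ++ [c]) 0 (0, 0, false) = fwdA cs 0 (0, 0, false) := by
            rw [fwdA_snoc]; simp [hv, hf]
          have eB : fwdB (cs ++ [c]) 0 (0, 0, 0, false) = fwdB cs 0 (0, 0, 0, false) := by
            rw [fwdB_snoc]; simp [isVowelB_eq, hv, hfB]
          rw [eA, eB]
          refine ⟨h1, h2, h3, Nat.le_trans hle (Nat.le_succ _), ?_, ?_, ?_, ?_⟩
          · intro h; rw [h] at hf; exact absurd hf (by decide)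
          · intro _ j
            rw [hstep1 j true hv, hC2 hf]
          · intro hc f
            rw [hstep1 f false hv, hC2 hf]
          · intro hc
            rw [backA_append cs c _ _ _ hle]
            exact hP hc
        · -- vowel, flag false: a new vowel group starts at index cs.length
          have hf' : (fwdA cs 0 (0, 0, false)).2.2 = false := by simpa using hf
          have hfB : (fwdB cs 0 (0, 0, 0, false)).2.2.2 = false := h3 ▸ hf'
          have eA : fwdA (cs ++ [c]) 0 (0, 0, false)
              = ((fwdA cs 0 (0, 0, false)).1 + 1, cs.length, true) := by
            rw [fwdA_snoc]; simp [hv, hf']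
          have eB : fwdB (cs ++ [c]) 0 (0, 0, 0, false)
              = ((fwdB cs 0 (0, 0, 0, false)).1 + 1,
                  (fwdB cs 0 (0, 0, 0, false)).2.2.1, cs.length, true) := by
            rw [fwdB_snoc]; simp [isVowelB_eq, hv, hfB]
          rw [eA, eB]
          refine ⟨by rw [h1], rfl, rfl, Nat.le_succ _, ?_, ?_, ?_, ?_⟩
          · intro h; simp at h
          · intro _ j
            rw [hstep1 j true hv, hC3 hf' cs.length]
          · intro _ f
            rw [hstep1 f false hv, hC3 hf' cs.length]
          · intro hc
            have hc1 : 1 ≤ (fwdA cs 0 (0, 0, false)).1 := by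
              have : 2 ≤ (fwdA cs 0 (0, 0, false)).1 + 1 := hc
              omega
            show backA (cs ++ [c]) cs.length cs.length false
                = (fwdB cs 0 (0, 0, 0, false)).2.2.1
            rw [backA_append cs c _ _ _ (Nat.le_refl _), hC1 hc1, h2]
      · -- c is not a vowel
        have hv' : isVowelA c = false := by simpa using hv
        have hstep0 : ∀ (j : Nat), backA (cs ++ [c]) (cs.length + 1) j false
            = backA cs cs.length j false := by
          intro j
          simp only [backA, getD_snoc, hv', Bool.false_eq_true, if_false]
          exact backA_append cs c _ _ _ (Nat.le_refl _)
        have hstepT : ∀ (j : Nat), backA (cs ++ [c]) (cs.length + 1) j true = j := by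
          intro j
          simp [backA, hv']
        have eA : fwdA (cs ++ [c]) 0 (0, 0, false)
            = ((fwdA cs 0 (0, 0, false)).1, (fwdA cs 0 (0, 0, false)).2.1, false) := by
          rw [fwdA_snoc]; simp [hv']
        have eB : fwdB (cs ++ [c]) 0 (0, 0, 0, false)
            = ((fwdB cs 0 (0, 0, 0, false)).1, (fwdB cs 0 (0, 0, 0, false)).2.1,
                (fwdB cs 0 (0, 0, 0, false)).2.2.1, false) := by
          rw [fwdB_snoc]; simp [isVowelB_eq, hv']
        rw [eA, eB]
        refine ⟨h1, h2, rfl, Nat.le_trans hle (Nat.le_succ _), ?_, ?_, ?_, ?_⟩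
        · intro _ j
          exact hstepT j
        · intro h; simp at h
        · intro hc f
          rw [hstep0 f]
          exact hC1 hc f
        · intro hc
          show backA (cs ++ [c]) (fwdA cs 0 (0, 0, false)).2.1
              (fwdA cs 0 (0, 0, false)).2.1 false = (fwdB cs 0 (0, 0, 0, false)).2.1
          rw [backA_append cs c _ _ _ hle]
          exact hP hc

theorem sidxA_eq (cs : List Char) (acc : Nat) :
    sidxA cs acc = acc + cs.findIdx isVowelB := by
  induction cs generalizing acc with
  | nil => simp [sidxA]
  | cons c t ih =>
      by_cases h : isVowelA c = true
      · simp [sidxA, h, List.findIdx_cons, isVowelB_eq]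
      · have h' : isVowelA c = false := by
          cases hh : isVowelA c
          · rfl
          · exact absurd hh h
        simp only [sidxA, Bool.false_eq_true, if_false, ih,
          List.findIdx_cons, isVowelB_eq, h']
        simp only [cond_false]
        omega

-- ===== VERDICT (by name: the statement is the Claim_ definition above) =====
theorem brangelina_spec : Claim_equal_brangelina := by
  intro first second _
  unfold Spec_brangelina brangelina brangelina_alt
  obtain ⟨h1, h2, _, _, _, _, _, hP⟩ := joint_inv first.toList
  simp only [sidxA_eq, Nat.zero_add]
  congr 2
  by_cases hc : 2 ≤ (fwdA first.toList 0 (0, 0, false)).1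
  · have hgt : (fwdA first.toList 0 (0, 0, false)).1 > 1 := hc
    rw [if_pos hgt, if_pos (h1 ▸ hc), hP hc]
  · rw [if_neg (by omega), if_neg (by rw [← h1]; omega), h2]
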